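-- pv_equiv track=rewrite | github.com/Sunhome22/Analog-Automagic-Layout | src/libraries/atr_lib.py | find_max_y_components
-- ===== SOURCE A (Python) =====
-- from collections import defaultdict
--
-- def find_max_y_components(possible_y_max_components: list) -> dict:
--     groups = defaultdict(list)
--
--     for component, y, group in possible_y_max_components:
--         groups[group].append((component, y))
--
--     max_y_components = {}
--     for group, components in groups.items():
--         max_y = max(components, key=lambda x: x[1])[1]
--         max_y_components[group] = [component for component, y in components if y == max_y]
--
--     return max_y_components
-- ===== SOURCE B (Python) =====
-- def find_max_y_components(possible_y_max_components: list) -> dict: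
--     # One pass: per group keep (current max y, components achieving it).
--     best = {}
--     for component, y, group in possible_y_max_components:
--         if group not in best:
--             best[group] = (y, [component])
--         else:
--             max_y, comps = best[group]
--             if y > max_y:
--                 best[group] = (y, [component])
--             elif y == max_y:
--                 comps.append(component)
--     result = {}
--     for group, (_, comps) in best.items():
--         result[group] = comps
--     return result
-- ===== Notes on version B (the rewrite author's own statement) =====
-- stated objective: alternative
-- what changed: Instead of first grouping all (component,y) pairs per group and then re-scanning each group with max() plus a filtering comprehension, B makes a single pass keeping per group only the running maximum y and the list of components attaining it.
import Mathlib
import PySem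

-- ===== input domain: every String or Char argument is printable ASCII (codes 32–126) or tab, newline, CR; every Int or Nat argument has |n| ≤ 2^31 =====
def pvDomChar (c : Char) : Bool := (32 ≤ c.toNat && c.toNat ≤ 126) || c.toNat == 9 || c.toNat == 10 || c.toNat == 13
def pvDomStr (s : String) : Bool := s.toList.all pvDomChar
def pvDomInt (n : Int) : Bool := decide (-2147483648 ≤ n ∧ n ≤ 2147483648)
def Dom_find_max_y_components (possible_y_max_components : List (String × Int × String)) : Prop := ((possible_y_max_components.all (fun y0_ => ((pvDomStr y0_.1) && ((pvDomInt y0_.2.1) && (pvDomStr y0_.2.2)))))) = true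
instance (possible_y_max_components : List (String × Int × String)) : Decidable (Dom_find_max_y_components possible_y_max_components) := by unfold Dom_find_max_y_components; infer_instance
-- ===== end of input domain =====

-- B replaces A's group-everything-then-rescan (max + filter per group) by a single pass that keeps,
-- per group, only the running maximum y and the components attaining it (alternative decomposition,
-- same asymptotic cost). Return-value equivalence; neither version mutates its argument.

-- ===== PORT A =====
def find_max_y_components (possible_y_max_components : List (String × Int × String)) : List (String × List String) :=
  let groups : PySem.Dict String (List (String × Int)) :=
    possible_y_max_components.foldl
      (fun d t => d.modify t.2.2 [] (fun l => l ++ [(t.1, t.2.1)])) PySem.Dict.empty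
  (groups.items.foldl
    (fun acc p =>
      match PySem.List.max? p.2 (fun q => q.2) with
      | none => acc   -- max() on [] would raise; unreachable, every group list is nonempty
      | some m => acc.insert p.1 ((p.2.filter (fun q => q.2 == m.2)).map (fun q => q.1)))
    PySem.Dict.empty).items

-- ===== PORT B =====
def find_max_y_components_alt (possible_y_max_components : List (String × Int × String)) : List (String × List String) :=
  let best : PySem.Dict String (Int × List String) :=
    possible_y_max_components.foldl
      (fun d t =>
        match d.get? t.2.2 with
        | none => d.insert t.2.2 (t.2.1, [t.1])
        | some (max_y, comps) =>
          if max_y < t.2.1 then d.insert t.2.2 (t.2.1, [t.1])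
          else if t.2.1 == max_y then d.insert t.2.2 (max_y, comps ++ [t.1])
          else d)
      PySem.Dict.empty
  (best.items.foldl (fun acc p => acc.insert p.1 p.2.2) PySem.Dict.empty).items

-- ===== PRECONDITION & SPEC =====
def Spec_find_max_y_components (possible_y_max_components : List (String × Int × String)) (out : List (String × List String)) : Prop := out = find_max_y_components_alt possible_y_max_components
instance (possible_y_max_components : List (String × Int × String)) (out : List (String × List String)) : Decidable (Spec_find_max_y_components possible_y_max_components out) := by unfold Spec_find_max_y_components; infer_instance

-- ===== CLAIM (what is proved, stated in full; the proofs are below) =====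
def Claim_equal_find_max_y_components : Prop := ∀ (possible_y_max_components : List (String × Int × String)), Dom_find_max_y_components possible_y_max_components → Spec_find_max_y_components possible_y_max_components (find_max_y_components possible_y_max_components)

-- ===== LEMMAS AND PROOFS =====

-- Summary of one group's accumulated (component, y) list: (max y, components attaining it).
def pvSumm (ps : List (String × Int)) : Int × List String :=
  match PySem.List.max? ps (fun q => q.2) with
  | none => (0, [])
  | some m => (m.2, (ps.filter (fun q => q.2 == m.2)).map (fun q => q.1))

lemma pv_max?_append (ps : List (String × Int)) (x : String × Int) :
    PySem.List.max? (ps ++ [x]) (fun q => q.2) =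
      match PySem.List.max? ps (fun q => q.2) with
      | none => some x
      | some m => if m.2 < x.2 then some x else some m := by
  cases hm : PySem.List.max? ps (fun q => q.2) with
  | none =>
    have hnil := (PySem.List.max?_eq_none_iff _ _).mp hm
    subst hnil
    simp [PySem.List.max?]
  | some m =>
    simp only [PySem.List.max?] at hm ⊢
    rw [List.foldl_append, hm]
    simp

lemma pvSumm_singleton (c : String) (y : Int) : pvSumm [(c, y)] = (y, [c]) := by
  simp [pvSumm, PySem.List.max?]

lemma pvSumm_append (ps : List (String × Int)) (c : String) (y : Int)
    (hps : ps ≠ []) :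
    pvSumm (ps ++ [(c, y)]) =
      if (pvSumm ps).1 < y then (y, [c])
      else if y == (pvSumm ps).1 then ((pvSumm ps).1, (pvSumm ps).2 ++ [c])
      else pvSumm ps := by
  obtain ⟨m, hm⟩ : ∃ m, PySem.List.max? ps (fun q => q.2) = some m := by
    cases h : PySem.List.max? ps (fun q => q.2) with
    | none => exact absurd ((PySem.List.max?_eq_none_iff _ _).mp h) hps
    | some m => exact ⟨m, rfl⟩
  have hmax : ∀ q ∈ ps, q.2 ≤ m.2 := fun q hq => PySem.List.max?_isMax hm q hq
  simp only [pvSumm, pv_max?_append, hm]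
  by_cases h1 : m.2 < y
  · have hfil : ps.filter (fun q => q.2 == y) = [] := by
      refine List.filter_eq_nil_iff.mpr ?_
      intro q hq
      have := hmax q hq
      simp only [beq_iff_eq]
      omega
    simp [List.filter_append, hfil, h1]
  · by_cases h2 : y = m.2
    · subst h2
      simp [List.filter_append]
    · simp [List.filter_append, h1, h2]

lemma pv_get?_of_map (ad : PySem.Dict String (List (String × Int)))
    (bd : PySem.Dict String (Int × List String))
    (hmap : bd.items = ad.items.map (fun p => (p.1, pvSumm p.2))) (g : String) :
    bd.get? g = (ad.get? g).map (fun ps => pvSumm ps) := by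
  simp [PySem.Dict.get?, hmap, List.find?_map, Function.comp_def, Option.map_map]

-- Invariant of the two first loops: B's dict is A's dict with every group list summarised.
lemma pv_inv (xs : List (String × Int × String))
    (ad : PySem.Dict String (List (String × Int)))
    (bd : PySem.Dict String (Int × List String))
    (hk : ad.keys.Nodup)
    (hne : ∀ p ∈ ad.items, p.2 ≠ [])
    (hmap : bd.items = ad.items.map (fun p => (p.1, pvSumm p.2))) :
    (xs.foldl
      (fun d t =>
        match d.get? t.2.2 with
        | none => d.insert t.2.2 (t.2.1, [t.1])
        | some (max_y, comps) =>
          if max_y < t.2.1 then d.insert t.2.2 (t.2.1, [t.1])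
          else if t.2.1 == max_y then d.insert t.2.2 (max_y, comps ++ [t.1])
          else d) bd).items
      = (xs.foldl (fun d t => d.modify t.2.2 [] (fun l => l ++ [(t.1, t.2.1)])) ad).items.map
          (fun p => (p.1, pvSumm p.2))
    ∧ (xs.foldl (fun d t => d.modify t.2.2 [] (fun l => l ++ [(t.1, t.2.1)])) ad).keys.Nodup
    ∧ ∀ p ∈ (xs.foldl (fun d t => d.modify t.2.2 [] (fun l => l ++ [(t.1, t.2.1)])) ad).items, p.2 ≠ [] := by
  induction xs generalizing ad bd with
  | nil => exact ⟨hmap, hk, hne⟩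
  | cons t xs ih =>
    obtain ⟨c, y, g⟩ := t
    simp only [List.foldl_cons]
    have hget := pv_get?_of_map ad bd hmap g
    cases h : ad.get? g with
    | none =>
      have hc : ad.contains g = false := by
        rw [PySem.Dict.contains_eq_isSome_get?, h]; rfl
      have hbg : bd.get? g = none := by rw [hget, h]; rfl
      have hbc : bd.contains g = false := by
        rw [PySem.Dict.contains_eq_isSome_get?, hbg]; rfl
      have hadi : (ad.modify g [] (fun l => l ++ [(c, y)])).items
          = ad.items ++ [(g, [(c, y)])] := by
        rw [PySem.Dict.modify, PySem.Dict.getD_of_not_contains _ _ hc,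
          PySem.Dict.items_insert_of_not_contains _ _ hc]
        rfl
      have hadk : (ad.modify g [] (fun l => l ++ [(c, y)])).keys = ad.keys ++ [g] := by
        rw [PySem.Dict.modify, PySem.Dict.getD_of_not_contains _ _ hc,
          PySem.Dict.keys_insert_of_not_contains _ _ hc]
      have hgk : g ∉ ad.keys := by
        intro hmem
        rw [(PySem.Dict.contains_iff_mem_keys _ _).mpr hmem] at hc
        simp at hc
      have hres := ih (ad.modify g [] (fun l => l ++ [(c, y)])) (bd.insert g (y, [c]))
        (by
          rw [hadk]
          refine List.Nodup.append hk (List.nodup_singleton g) ?_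
          intro a ha hb
          simp at hb
          subst hb
          exact hgk ha)
        (by
          intro p hp
          rw [hadi] at hp
          rcases List.mem_append.mp hp with hp | hp
          · exact hne p hp
          · simp at hp
            subst hp
            simp)
        (by
          rw [PySem.Dict.items_insert_of_not_contains _ _ hbc, hadi, hmap,
            List.map_append]
          simp [pvSumm_singleton])
      rw [hbg]
      exact hres
    | some ps =>
      have hc : ad.contains g = true := by
        rw [PySem.Dict.contains_eq_isSome_get?, h]; rfl
      have hbg : bd.get? g = some (pvSumm ps) := by rw [hget, h]; rfl
      have hbc : bd.contains g = true := by
        rw [PySem.Dict.contains_eq_isSome_get?, hbg]; rfl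
      have hps : ps ≠ [] := hne (g, ps) (PySem.Dict.mem_items_of_get?_eq_some _ h)
      have hadm : ad.modify g [] (fun l => l ++ [(c, y)]) = ad.insert g (ps ++ [(c, y)]) := by
        rw [PySem.Dict.modify, PySem.Dict.getD_of_get?_eq_some _ _ h]
      have hadi : (ad.insert g (ps ++ [(c, y)])).items
          = ad.items.map (fun p => if p.1 == g then (g, ps ++ [(c, y)]) else p) :=
        PySem.Dict.items_insert_of_contains _ _ hc
      have hkey : ∀ p ∈ ad.items, (p.1 == g) = true → p = (g, ps) := by
        intro p hp hpg
        have h1 : p.1 = g := eq_of_beq hpg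
        have h2 : ad.get? p.1 = some p.2 := PySem.Dict.get?_of_mem_items _ hp hk
        rw [h1, h] at h2
        have h3 : p.2 = ps := (Option.some.inj h2).symm
        calc p = (p.1, p.2) := rfl
          _ = (g, ps) := by rw [h1, h3]
      have hk' : (ad.insert g (ps ++ [(c, y)])).keys.Nodup := by
        rw [PySem.Dict.keys_insert_of_contains _ _ hc]; exact hk
      have hne' : ∀ p ∈ (ad.insert g (ps ++ [(c, y)])).items, p.2 ≠ [] := by
        intro p hp
        rw [hadi] at hp
        obtain ⟨q, hq, rfl⟩ := List.mem_map.mp hp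
        by_cases hqg : (q.1 == g) = true
        · simp only [hqg, if_pos]; simp
        · rw [if_neg (by simp_all)]
          exact hne q hq
      -- items relation for the 'insert the right summary' branches
      have hcong : ∀ v : Int × List String, v = pvSumm (ps ++ [(c, y)]) →
          (bd.insert g v).items
            = (ad.insert g (ps ++ [(c, y)])).items.map (fun p => (p.1, pvSumm p.2)) := by
        intro v hv
        rw [PySem.Dict.items_insert_of_contains _ _ hbc, hadi, hmap, List.map_map,
          List.map_map]
        refine List.map_congr_left ?_
        intro p hp
        by_cases hpg : (p.1 == g) = true
        · have hpe := hkey p hp hpg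
          rw [hpe]
          simp [hv]
        · have hne2 : p.1 ≠ g := by simpa using hpg
          simp [hne2]
      -- items relation for the 'do nothing' branch
      have hcong0 : pvSumm (ps ++ [(c, y)]) = pvSumm ps →
          bd.items
            = (ad.insert g (ps ++ [(c, y)])).items.map (fun p => (p.1, pvSumm p.2)) := by
        intro hv
        rw [hadi, hmap, List.map_map]
        refine List.map_congr_left ?_
        intro p hp
        by_cases hpg : (p.1 == g) = true
        · have hpe := hkey p hp hpg
          rw [hpe]
          simp [hv]
        · have hne2 : p.1 ≠ g := by simpa using hpg
          simp [hne2]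
      rcases hSeq : pvSumm ps with ⟨M, L⟩
      have hsum := pvSumm_append ps c y hps
      rw [hSeq] at hsum
      have hbg' : bd.get? g = some (M, L) := by rw [hbg, hSeq]
      rw [hadm]
      simp only [hbg']
      by_cases h1 : M < y
      · rw [if_pos h1]
        exact ih _ _ hk' hne' (hcong (y, [c]) (by rw [hsum, if_pos h1]))
      · rw [if_neg h1]
        by_cases h2 : (y == M) = true
        · rw [if_pos h2]
          exact ih _ _ hk' hne' (hcong (M, L ++ [c]) (by rw [hsum, if_neg h1, if_pos h2]))
        · rw [if_neg (by simp_all)]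
          have h0 : pvSumm (ps ++ [(c, y)]) = pvSumm ps := by
            rw [hsum, if_neg h1, if_neg (by simp_all), hSeq]
          exact ih _ _ hk' hne' (hcong0 h0)

-- The two second loops produce the same association list.
lemma pv_final (ad : PySem.Dict String (List (String × Int)))
    (bd : PySem.Dict String (Int × List String))
    (hk : ad.keys.Nodup)
    (hne : ∀ p ∈ ad.items, p.2 ≠ [])
    (hmap : bd.items = ad.items.map (fun p => (p.1, pvSumm p.2))) :
    (ad.items.foldl
      (fun acc p =>
        match PySem.List.max? p.2 (fun q => q.2) with
        | none => acc
        | some m => acc.insert p.1 ((p.2.filter (fun q => q.2 == m.2)).map (fun q => q.1)))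
      PySem.Dict.empty).items
    = (bd.items.foldl (fun acc p => acc.insert p.1 p.2.2) PySem.Dict.empty).items := by
  have hA : (ad.items.foldl
      (fun acc p =>
        match PySem.List.max? p.2 (fun q => q.2) with
        | none => acc
        | some m => acc.insert p.1 ((p.2.filter (fun q => q.2 == m.2)).map (fun q => q.1)))
      PySem.Dict.empty)
      = ad.items.foldl (fun acc p => acc.insert p.1 (pvSumm p.2).2) PySem.Dict.empty := by
    refine PySem.List.foldl_congr_mem _ _ _ _ ?_
    intro acc p hp
    obtain ⟨m, hm⟩ : ∃ m, PySem.List.max? p.2 (fun q => q.2) = some m := by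
      cases hmm : PySem.List.max? p.2 (fun q => q.2) with
      | none => exact absurd ((PySem.List.max?_eq_none_iff _ _).mp hmm) (hne p hp)
      | some m => exact ⟨m, rfl⟩
    rw [hm]
    simp [pvSumm, hm]
  rw [hA,
    PySem.Dict.items_foldl_insert_fresh ad.items (fun p => p.1) (fun p => (pvSumm p.2).2)
      PySem.Dict.empty
      (by intro a _; exact PySem.Dict.contains_empty _)
      (by simpa [PySem.Dict.keys] using hk),
    PySem.Dict.items_foldl_insert_fresh bd.items (fun p => p.1) (fun p => p.2.2)
      PySem.Dict.empty
      (by intro a _; exact PySem.Dict.contains_empty _)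
      (by rw [hmap]; simpa [List.map_map, Function.comp_def, PySem.Dict.keys] using hk),
    hmap]
  simp [List.map_map, Function.comp_def]

-- ===== VERDICT (by name: the statement is the Claim_ definition above) =====
theorem find_max_y_components_spec : Claim_equal_find_max_y_components := by
  intro xs _
  have hinv := pv_inv xs PySem.Dict.empty PySem.Dict.empty
    (by simp [PySem.Dict.keys, PySem.Dict.empty])
    (by intro p hp; simp [PySem.Dict.empty] at hp)
    (by simp [PySem.Dict.empty])
  exact pv_final _ _ hinv.2.1 hinv.2.2 hinv.1
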